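-- pv_equiv track=rewrite | github.com/DDriggs00/CS360 | join.py | append2
-- ===== SOURCE A (Python) =====
-- def append2(tagged, Query, POS, POS2):
--     temp = False
--     i = 0
--     for row in tagged:
--         if temp:
--             if tagged[i][1] != POS2 and tagged[i][1] != POS:
--                 break
--             else:
--                 Query += tagged[i][0]
--                 Query += ' '
--                 tagged[i] = ((tagged[i][0]), ('X' + tagged[i][1]))
--
--         if tagged[i][1] == POS:
--             Query += tagged[i][0]
--             Query += ' '
--             tagged[i] = ((tagged[i][0]), ('X' + tagged[i][1]))
--             temp = True
--
--         i += 1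
--     return Query
-- ===== SOURCE B (Python) =====
-- def append2(tagged, Query, POS, POS2):
--     # Loop-free staged passes: locate the run by index computation on the tag
--     # list, then rewrite it with one slice assignment and one join.
--     tags = [t for _, t in tagged]
--     if POS not in tags:
--         return Query
--     start = tags.index(POS)
--     after = tags[start + 1:]
--     stops = [k for k, t in enumerate(after) if t != POS and t != POS2]
--     end = start + 1 + (stops[0] if stops else len(after))
--     run = tagged[start:end]
--     tagged[start:end] = [(w, 'X' + t) for w, t in run]
--     return Query + ''.join(w + ' ' for w, _ in run)
-- ===== Notes on version B (the rewrite author's own statement) =====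
-- stated objective: alternative
-- what changed: Replaces A's single stateful scan (temp flag, break, per-row mutation and re-read of the just-mutated tag) by a loop-free staged computation: build the tag list, locate the run boundaries by index()/enumerate-filter arithmetic, rewrite the run with one slice assignment and produce the query with one join.
-- intended difference: When POS = 'X'+POS2 and a POS2-tagged token follows inside the run after the first POS token, A re-reads the tag it just mutated to 'X'+POS2 (= POS) and appends that word twice (e.g. 'a b b '), while B appends each run word once ('a b '), which is the intended query. — e.g. on append2([("a", "XN"), ("b", "N")], "", "XN", "N"): A returns "a b b ", B returns "a b "
import Mathlib
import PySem

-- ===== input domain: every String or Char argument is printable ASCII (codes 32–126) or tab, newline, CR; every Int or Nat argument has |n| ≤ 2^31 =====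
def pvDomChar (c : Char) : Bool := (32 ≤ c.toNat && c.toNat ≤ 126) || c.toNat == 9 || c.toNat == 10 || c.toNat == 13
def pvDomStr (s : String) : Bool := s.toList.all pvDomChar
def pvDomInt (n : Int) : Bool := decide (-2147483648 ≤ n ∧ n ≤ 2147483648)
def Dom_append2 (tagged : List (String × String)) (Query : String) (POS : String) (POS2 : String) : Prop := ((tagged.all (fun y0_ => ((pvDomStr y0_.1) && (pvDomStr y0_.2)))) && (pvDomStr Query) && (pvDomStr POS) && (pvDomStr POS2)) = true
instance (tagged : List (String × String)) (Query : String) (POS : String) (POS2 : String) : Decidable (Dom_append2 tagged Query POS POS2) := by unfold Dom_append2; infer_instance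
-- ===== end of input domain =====

-- B replaces A's one-pass temp-flag loop (which re-reads the tag it just mutated) by a
-- loop-free staged computation over the tag list; equivalence is about the RETURN value
-- (both Pythons also mutate `tagged` in place, identically outside D_append2).

-- ===== PORT A =====
-- the loop of A: state is (remaining rows, Query, temp); inside the temp branch the current
-- tag is mutated to "X" ++ t BEFORE the second `if` re-reads it, exactly as in the Python
def append2Go : List (String × String) → String → Bool → String → String → String
  | [], Q, _, _, _ => Q
  | (w, t) :: rs, Q, temp, POS, POS2 =>
    if temp then
      if t ≠ POS2 ∧ t ≠ POS then Q        -- break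
      else
        let Q' := Q ++ w ++ " "
        let t' := "X" ++ t                 -- tagged[i] mutated, then re-read by the next if
        if t' = POS then append2Go rs (Q' ++ w ++ " ") true POS POS2
        else append2Go rs Q' true POS POS2
    else
      if t = POS then append2Go rs (Q ++ w ++ " ") true POS POS2
      else append2Go rs Q false POS POS2

def append2 (tagged : List (String × String)) (Query : String) (POS : String) (POS2 : String) : String :=
  append2Go tagged Query false POS POS2

-- ===== PORT B =====
-- loop-free: tags = [t for _,t in tagged]; if POS not in tags: return Query;
-- start = tags.index(POS); after = tags[start+1:]  (in-range slice = drop);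
-- stops = [k for k,t in enumerate(after) if t != POS and t != POS2];
-- end = start+1+(stops[0] if stops else len(after)); run = tagged[start:end];
-- return Query + ''.join(w + ' ' for w,_ in run)
def append2_alt (tagged : List (String × String)) (Query : String) (POS : String) (POS2 : String) : String :=
  let tags := tagged.map Prod.snd
  if POS ∈ tags then
    match PySem.List.index? tags POS with
    | some start =>
      let after := tags.drop (start + 1)
      let stops := ((PySem.List.enumerate after 0).filter
          (fun kt => kt.2 != POS && kt.2 != POS2)).map Prod.fst
      let e : Int := stops.headD (after.length : Int)   -- stops[0] if stops else len(after)
      let run := PySem.List.slice tagged (some (start : Int)) (some ((start : Int) + 1 + e))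
      Query ++ String.join (run.map (fun r => r.1 ++ " "))
    | none => Query                        -- unreachable: POS ∈ tags
  else Query

-- ===== PRECONDITION & SPEC =====
-- When POS = "X" ++ POS2 and a POS2-tagged token occurs in the run right after the first
-- POS-tagged token, A re-reads the tag it just mutated to "X" ++ POS2 (= POS) and appends
-- that word twice; B appends each run word once, which is the intended query.
def D_append2 (tagged : List (String × String)) (Query : String) (POS : String) (POS2 : String) : Prop :=
  POS = "X" ++ POS2 ∧
  POS2 ∈ ((((tagged.dropWhile (·.2 != POS)).drop 1).takeWhile
      (fun r => r.2 == POS || r.2 == POS2)).map Prod.snd)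
instance (tagged : List (String × String)) (Query : String) (POS : String) (POS2 : String) : Decidable (D_append2 tagged Query POS POS2) := by unfold D_append2; infer_instance

def Spec_append2 (tagged : List (String × String)) (Query : String) (POS : String) (POS2 : String) (out : String) : Prop := ¬ D_append2 tagged Query POS POS2 → out = append2_alt tagged Query POS POS2
instance (tagged : List (String × String)) (Query : String) (POS : String) (POS2 : String) (out : String) : Decidable (Spec_append2 tagged Query POS POS2 out) := by unfold Spec_append2; infer_instance

def pvDiffWitness_append2 : (List (String × String)) × String × String × String :=
  ([("a", "XN"), ("b", "N")], "", "XN", "N")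
def pvDiffWitnessOut_append2 : String × String := ("a b b ", "a b ")

-- ===== CLAIM (what is proved, stated in full; the proofs are below) =====
def Claim_unchanged_append2 : Prop := ∀ (tagged : List (String × String)) (Query : String) (POS : String) (POS2 : String), Dom_append2 tagged Query POS POS2 → Spec_append2 tagged Query POS POS2 (append2 tagged Query POS POS2)
def Claim_changed_append2 : Prop := Dom_append2 (pvDiffWitness_append2.1) (pvDiffWitness_append2.2.1) (pvDiffWitness_append2.2.2.1) (pvDiffWitness_append2.2.2.2) ∧ D_append2 (pvDiffWitness_append2.1) (pvDiffWitness_append2.2.1) (pvDiffWitness_append2.2.2.1) (pvDiffWitness_append2.2.2.2) ∧ append2 (pvDiffWitness_append2.1) (pvDiffWitness_append2.2.1) (pvDiffWitness_append2.2.2.1) (pvDiffWitness_append2.2.2.2) = pvDiffWitnessOut_append2.1 ∧ append2_alt (pvDiffWitness_append2.1) (pvDiffWitness_append2.2.1) (pvDiffWitness_append2.2.2.1) (pvDiffWitness_append2.2.2.2) = pvDiffWitnessOut_append2.2 ∧ pvDiffWitnessOut_append2.1 ≠ pvDiffWitnessOut_append2.2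
def Claim_exact_append2 : Prop := ∀ (tagged : List (String × String)) (Query : String) (POS : String) (POS2 : String), Dom_append2 tagged Query POS POS2 → D_append2 tagged Query POS POS2 → append2 tagged Query POS POS2 ≠ append2_alt tagged Query POS POS2

-- ===== LEMMAS AND PROOFS =====

-- the words A's extension phase would append once each (proof-only characterisation)
def extendRun : List (String × String) → String → String → List String
  | [], _, _ => []
  | (w, t) :: rs, POS, POS2 =>
    if t = POS ∨ t = POS2 then w :: extendRun rs POS POS2 else []

-- the reachability part of D_append2, on the suffix after the first POS token
def ReachI (POS POS2 : String) (rs : List (String × String)) : Prop :=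
  POS2 ∈ ((rs.takeWhile (fun r => r.2 == POS || r.2 == POS2)).map Prod.snd)

lemma reachI_cons (POS POS2 w t) (rs : List (String × String)) :
    ReachI POS POS2 ((w, t) :: rs) ↔ (t = POS2 ∨ ((t = POS ∨ t = POS2) ∧ ReachI POS POS2 rs)) := by
  by_cases h2 : t = POS2
  · simp [ReachI, h2]
  · by_cases h1 : t = POS
    · have hne : POS2 ≠ POS := fun h => h2 (h1.trans h.symm)
      simp [ReachI, h1, hne, hne.symm]
    · simp [ReachI, h1, h2]

lemma xcons_ne (s : String) : "X" ++ s ≠ s := by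
  intro h
  have hl := congrArg String.length h
  simp [String.length_append] at hl

lemma foldl_append_str (l : List String) : ∀ s : String, l.foldl (· ++ ·) s = s ++ l.foldl (· ++ ·) "" := by
  induction l with
  | nil => intro s; simp
  | cons a l ih =>
    intro s
    rw [List.foldl_cons, List.foldl_cons, ih (s ++ a), ih ("" ++ a)]
    simp [String.append_assoc]

lemma join_cons (a : String) (l : List String) : String.join (a :: l) = a ++ String.join l := by
  simp only [String.join, List.foldl_cons]
  rw [foldl_append_str l ("" ++ a), foldl_append_str l ""]
  simp

-- the stop-index computation of B equals the takeWhile length of the run tags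
lemma stopsF (POS POS2 : String) : ∀ (ts : List String) (s : Int),
    ((((PySem.List.enumerate ts s).filter
        (fun kt => kt.2 != POS && kt.2 != POS2)).map Prod.fst).headD (s + (ts.length : Int)))
      = s + (((ts.takeWhile (fun t => t == POS || t == POS2)).length : Nat) : Int) := by
  intro ts
  induction ts with
  | nil => intro s; simp [PySem.List.enumerate_nil]
  | cons t ts ih =>
    intro s
    rw [PySem.List.enumerate_cons]
    by_cases hp : (t = POS ∨ t = POS2)
    · have hb : (t != POS && t != POS2) = false := by
        rcases hp with h | h <;> simp [h]
      have hw : (t == POS || t == POS2) = true := by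
        rcases hp with h | h <;> simp [h]
      rw [List.filter_cons_of_neg (by simp [hb])]
      have hd : s + ((List.length (t :: ts) : Nat) : Int) = (s + 1) + (ts.length : Int) := by
        simp [List.length_cons]; push_cast; ring
      rw [hd, ih (s + 1), List.takeWhile_cons_of_pos (by simp [hw])]
      simp [List.length_cons]; push_cast; ring
    · have hb : (t != POS && t != POS2) = true := by
        push_neg at hp
        simp [hp.1, hp.2]
      have hw : (t == POS || t == POS2) = false := by
        push_neg at hp
        simp [hp.1, hp.2]
      rw [List.filter_cons_of_pos (by simp [hb])]
      rw [List.takeWhile_cons_of_neg (by simp [hw])]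
      simp

-- the words of the run slice are exactly extendRun
lemma takeRun (POS POS2 : String) : ∀ (rs : List (String × String)),
    (rs.take ((rs.map Prod.snd).takeWhile (fun t => t == POS || t == POS2)).length).map Prod.fst
      = extendRun rs POS POS2 := by
  intro rs
  induction rs with
  | nil => simp [extendRun]
  | cons hd tl ih =>
    obtain ⟨w, t⟩ := hd
    by_cases hp : (t = POS ∨ t = POS2)
    · have hw : (t == POS || t == POS2) = true := by
        rcases hp with h | h <;> simp [h]
      rw [List.map_cons, List.takeWhile_cons_of_pos (by simp [hw])]
      simp only [List.length_cons, List.take_succ_cons, List.map_cons, ih]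
      simp [extendRun, hp]
    · have hw : (t == POS || t == POS2) = false := by
        push_neg at hp
        simp [hp.1, hp.2]
      rw [List.map_cons, List.takeWhile_cons_of_neg (by simp [hw])]
      simp [extendRun, hp]

lemma alt_nil (POS POS2 Q : String) : append2_alt [] Q POS POS2 = Q := by
  simp [append2_alt]

lemma alt_cons_pos (POS POS2 w : String) (tl : List (String × String)) (Q : String) :
    append2_alt ((w, POS) :: tl) Q POS POS2 =
      Q ++ String.join ((w :: extendRun tl POS POS2).map (· ++ " ")) := by
  have hmem : POS ∈ POS :: tl.map Prod.snd := by simp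
  simp only [append2_alt, List.map_cons, if_pos hmem, PySem.List.index?_cons_self,
    List.drop_succ_cons, List.drop_zero]
  set L := ((tl.map Prod.snd).takeWhile (fun t => t == POS || t == POS2)).length with hL
  have hstops := stopsF POS POS2 (tl.map Prod.snd) 0
  simp only [zero_add] at hstops
  rw [hstops, ← hL]
  rw [show ((0 : Nat) : Int) + 1 + ((L : Nat) : Int) = (((L + 1 : Nat)) : Int) by push_cast; ring]
  rw [PySem.List.slice_natCast]
  simp only [List.drop_zero, Nat.sub_zero, List.take_succ_cons]
  have hmm : (tl.take L).map (fun r => r.1 ++ " ") = (extendRun tl POS POS2).map (· ++ " ") := by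
    rw [show (fun r : String × String => r.1 ++ " ") = (fun s : String => s ++ " ") ∘ Prod.fst from rfl,
      ← List.map_map, hL, takeRun POS POS2 tl]
  rw [List.map_cons, hmm]

lemma alt_cons_neg (POS POS2 w t : String) (tl : List (String × String)) (Q : String)
    (ht : t ≠ POS) :
    append2_alt ((w, t) :: tl) Q POS POS2 = append2_alt tl Q POS POS2 := by
  by_cases hm : POS ∈ tl.map Prod.snd
  · have hmem : POS ∈ t :: tl.map Prod.snd := by simp [hm]
    obtain ⟨j, hj⟩ : ∃ j, PySem.List.index? (tl.map Prod.snd) POS = some j := by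
      have := (PySem.List.index?_isSome_iff (tl.map Prod.snd) POS).mpr hm
      exact Option.isSome_iff_exists.mp this
    have hidx : PySem.List.index? (t :: tl.map Prod.snd) POS = some (j + 1) := by
      rw [PySem.List.index?_cons_of_ne _ ht, hj]; rfl
    simp only [append2_alt, List.map_cons, if_pos hmem, if_pos hm, hidx, hj,
      List.drop_succ_cons]
    set after := (tl.map Prod.snd).drop (j + 1) with hafter
    set L := (after.takeWhile (fun t => t == POS || t == POS2)).length with hLdef
    have hstops := stopsF POS POS2 after 0
    simp only [zero_add] at hstops
    rw [hstops, ← hLdef]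
    rw [show ((j + 1 : Nat) : Int) + 1 + ((L : Nat) : Int) = ((j + 2 + L : Nat) : Int) by
      push_cast; ring]
    rw [show ((j : Nat) : Int) + 1 + ((L : Nat) : Int) = ((j + 1 + L : Nat) : Int) by
      push_cast; ring]
    rw [PySem.List.slice_natCast, PySem.List.slice_natCast, List.drop_succ_cons,
      show j + 2 + L - (j + 1) = 1 + L by omega, show j + 1 + L - j = 1 + L by omega]
  · have hmem : POS ∉ t :: tl.map Prod.snd := by
      intro h
      rcases List.mem_cons.mp h with h | h
      · exact ht h.symm
      · exact hm h
    simp [append2_alt, hmem, hm]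

lemma ext_lemma (POS POS2 : String) : ∀ (rs : List (String × String)),
    ¬ (POS = "X" ++ POS2 ∧ ReachI POS POS2 rs) → ∀ Q,
    append2Go rs Q true POS POS2 =
      Q ++ String.join ((extendRun rs POS POS2).map (· ++ " ")) := by
  intro rs
  induction rs with
  | nil => intro _ Q; simp [append2Go, extendRun, String.join]
  | cons hd tl ih =>
    obtain ⟨w, t⟩ := hd
    intro h Q
    by_cases hbrk : t ≠ POS2 ∧ t ≠ POS
    · have hrun : ¬ (t = POS ∨ t = POS2) := by tauto
      simp [append2Go, extendRun, hbrk.1, hbrk.2, String.join]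
    · have hrun : t = POS ∨ t = POS2 := by tauto
      have hnp : ¬ ("X" ++ t = POS) := by
        intro hX
        rcases hrun with h1 | h2
        · exact xcons_ne POS (h1 ▸ hX)
        · exact h ⟨by rw [← hX, h2], by rw [reachI_cons]; left; exact h2⟩
      have hnotail : ¬ (POS = "X" ++ POS2 ∧ ReachI POS POS2 tl) := by
        rintro ⟨hx, hr⟩
        exact h ⟨hx, by rw [reachI_cons]; right; exact ⟨hrun, hr⟩⟩
      have hgo : append2Go ((w, t) :: tl) Q true POS POS2 =
          append2Go tl (Q ++ w ++ " ") true POS POS2 := by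
        simp only [append2Go]
        rw [if_neg (by tauto : ¬ (t ≠ POS2 ∧ t ≠ POS))]
        simp [if_neg hnp]
      have hext : extendRun ((w, t) :: tl) POS POS2 = w :: extendRun tl POS POS2 := by
        simp [extendRun, hrun]
      rw [hgo, ih hnotail, hext, List.map_cons, join_cons]
      simp [String.append_assoc]

lemma D_cons_pos (POS POS2 w t) (rs : List (String × String)) (Q : String) (ht : t = POS) :
    D_append2 ((w, t) :: rs) Q POS POS2 ↔ (POS = "X" ++ POS2 ∧ ReachI POS POS2 rs) := by
  unfold D_append2 ReachI
  rw [List.dropWhile_cons]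
  simp [ht]

lemma D_cons_neg (POS POS2 w t) (rs : List (String × String)) (Q Q' : String) (ht : t ≠ POS) :
    D_append2 ((w, t) :: rs) Q POS POS2 ↔ D_append2 rs Q' POS POS2 := by
  unfold D_append2
  rw [List.dropWhile_cons]
  simp [ht]

lemma main_lemma (POS POS2 : String) (tagged : List (String × String)) :
    ∀ Q, ¬ D_append2 tagged Q POS POS2 →
      append2Go tagged Q false POS POS2 = append2_alt tagged Q POS POS2 := by
  induction tagged with
  | nil => intro Q _; simp [append2Go, alt_nil]
  | cons hd tl ih =>
    obtain ⟨w, t⟩ := hd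
    intro Q hnD
    by_cases ht : t = POS
    · have hgo : append2Go ((w, t) :: tl) Q false POS POS2 =
          append2Go tl (Q ++ w ++ " ") true POS POS2 := by
        simp [append2Go, ht]
      have hnr : ¬ (POS = "X" ++ POS2 ∧ ReachI POS POS2 tl) :=
        fun hc => hnD ((D_cons_pos POS POS2 w t tl Q ht).mpr hc)
      rw [hgo, ext_lemma POS POS2 tl hnr (Q ++ w ++ " "), ht,
        alt_cons_pos POS POS2 w tl Q, List.map_cons, join_cons]
      simp [String.append_assoc]
    · have hgo : append2Go ((w, t) :: tl) Q false POS POS2 =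
          append2Go tl Q false POS POS2 := by
        simp [append2Go, ht]
      rw [hgo, alt_cons_neg POS POS2 w t tl Q ht]
      exact ih Q (fun hc => hnD ((D_cons_neg POS POS2 w t tl Q Q ht).mpr hc))

-- A's extension phase as the words it appends (with the duplication when "X" ++ t = POS)
def goW (POS POS2 : String) : List (String × String) → String
  | [] => ""
  | (w, t) :: rs =>
    if t ≠ POS2 ∧ t ≠ POS then ""
    else if "X" ++ t = POS then w ++ " " ++ (w ++ " " ++ goW POS POS2 rs)
    else w ++ " " ++ goW POS POS2 rs

lemma go_total (POS POS2 : String) : ∀ (rs : List (String × String)) (Q : String),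
    append2Go rs Q true POS POS2 = Q ++ goW POS POS2 rs := by
  intro rs
  induction rs with
  | nil => intro Q; simp [append2Go, goW]
  | cons hd tl ih =>
    obtain ⟨w, t⟩ := hd
    intro Q
    by_cases hbrk : t ≠ POS2 ∧ t ≠ POS
    · simp [append2Go, goW, hbrk.1, hbrk.2]
    · by_cases hX : "X" ++ t = POS
      · have hgo : append2Go ((w, t) :: tl) Q true POS POS2 =
            append2Go tl (Q ++ w ++ " " ++ w ++ " ") true POS POS2 := by
          simp only [append2Go]
          rw [if_neg hbrk]
          simp [hX]
        rw [hgo, ih]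
        simp [goW, hbrk, hX, String.append_assoc]
      · have hgo : append2Go ((w, t) :: tl) Q true POS POS2 =
            append2Go tl (Q ++ w ++ " ") true POS POS2 := by
          simp only [append2Go]
          rw [if_neg hbrk]
          simp [hX]
        rw [hgo, ih]
        simp [goW, hbrk, hX, String.append_assoc]

lemma len_ext_le (POS POS2 : String) : ∀ (rs : List (String × String)),
    (String.join ((extendRun rs POS POS2).map (· ++ " "))).length ≤ (goW POS POS2 rs).length := by
  intro rs
  induction rs with
  | nil => simp [extendRun, goW, String.join]
  | cons hd tl ih =>
    obtain ⟨w, t⟩ := hd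
    by_cases hrun : t = POS ∨ t = POS2
    · have hbrk : ¬ (t ≠ POS2 ∧ t ≠ POS) := by tauto
      rw [show extendRun ((w, t) :: tl) POS POS2 = w :: extendRun tl POS POS2 by
        simp [extendRun, hrun]]
      rw [List.map_cons, join_cons]
      by_cases hX : "X" ++ t = POS
      · simp only [goW, if_neg hbrk, if_pos hX]
        simp only [String.length_append]
        omega
      · simp only [goW, if_neg hbrk, if_neg hX]
        simp only [String.length_append]
        omega
    · rw [show extendRun ((w, t) :: tl) POS POS2 = [] by simp [extendRun, hrun]]
      simp [String.join]

lemma len_ext_lt (POS POS2 : String) (hx : POS = "X" ++ POS2) :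
    ∀ (rs : List (String × String)), ReachI POS POS2 rs →
    (String.join ((extendRun rs POS POS2).map (· ++ " "))).length < (goW POS POS2 rs).length := by
  intro rs
  induction rs with
  | nil => intro hr; exact absurd hr (by simp [ReachI])
  | cons hd tl ih =>
    obtain ⟨w, t⟩ := hd
    intro hr
    rw [reachI_cons] at hr
    have hrun : t = POS ∨ t = POS2 := by tauto
    have hbrk : ¬ (t ≠ POS2 ∧ t ≠ POS) := by tauto
    rw [show extendRun ((w, t) :: tl) POS POS2 = w :: extendRun tl POS POS2 by
      simp [extendRun, hrun]]
    rw [List.map_cons, join_cons]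
    rcases hr with h2 | ⟨_, hrtl⟩
    · have hX : "X" ++ t = POS := by rw [h2, hx]
      have := len_ext_le POS POS2 tl
      simp only [goW, if_neg hbrk, if_pos hX]
      simp only [String.length_append]
      have h1 : (" " : String).length = 1 := by decide
      omega
    · have := ih hrtl
      by_cases hX : "X" ++ t = POS
      · simp only [goW, if_neg hbrk, if_pos hX]
        simp only [String.length_append]
        omega
      · simp only [goW, if_neg hbrk, if_neg hX]
        simp only [String.length_append]
        omega

lemma tight_ext (POS POS2 : String) (hx : POS = "X" ++ POS2)
    (rs : List (String × String)) (hr : ReachI POS POS2 rs) (Q : String) :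
    append2Go rs Q true POS POS2 ≠ Q ++ String.join ((extendRun rs POS POS2).map (· ++ " ")) := by
  intro h
  have hl := congrArg String.length h
  rw [go_total] at hl
  simp only [String.length_append] at hl
  have := len_ext_lt POS POS2 hx rs hr
  omega

lemma tight_main (POS POS2 : String) (tagged : List (String × String)) :
    ∀ Q, D_append2 tagged Q POS POS2 →
      append2Go tagged Q false POS POS2 ≠ append2_alt tagged Q POS POS2 := by
  induction tagged with
  | nil => intro Q hD; exact absurd hD (by simp [D_append2])
  | cons hd tl ih =>
    obtain ⟨w, t⟩ := hd
    intro Q hD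
    by_cases ht : t = POS
    · obtain ⟨hx, hr⟩ := (D_cons_pos POS POS2 w t tl Q ht).mp hD
      have hgo : append2Go ((w, t) :: tl) Q false POS POS2 =
          append2Go tl (Q ++ w ++ " ") true POS POS2 := by
        simp [append2Go, ht]
      rw [hgo, ht, alt_cons_pos POS POS2 w tl Q, List.map_cons, join_cons]
      have : Q ++ (w ++ " " ++ String.join ((extendRun tl POS POS2).map (· ++ " "))) =
          Q ++ w ++ " " ++ String.join ((extendRun tl POS POS2).map (· ++ " ")) := by
        simp [String.append_assoc]
      rw [this]
      exact tight_ext POS POS2 hx tl hr (Q ++ w ++ " ")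
    · have hgo : append2Go ((w, t) :: tl) Q false POS POS2 =
          append2Go tl Q false POS POS2 := by
        simp [append2Go, ht]
      rw [hgo, alt_cons_neg POS POS2 w t tl Q ht]
      exact ih Q ((D_cons_neg POS POS2 w t tl Q Q ht).mp hD)

-- ===== VERDICT (by name: the statement is the Claim_ definition above) =====
theorem append2_spec : Claim_unchanged_append2 := by
  intro tagged Query POS POS2 _ hnD
  exact main_lemma POS POS2 tagged Query hnD

theorem append2_changed : Claim_changed_append2 := by
  unfold Claim_changed_append2; decide

theorem append2_tight : Claim_exact_append2 := by
  intro tagged Query POS POS2 _ hD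
  exact tight_main POS POS2 tagged Query hD
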